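-- pv_equiv track=rewrite | github.com/vale0arc/sudoku-logica | 3ra entrega/Problemas.py | region
-- ===== SOURCE A (Python) =====
-- def region(n,x,y):
--     otras_casillas = []
--     if (x==0 or x==1) and (y==0 or y==1):
--         otras_casillas=[(n,x1,y1) for y1 in range(2)  for x1 in range(2) if x1!= x or y1!=y]
--     if (x==0 or x==1) and (y==2 or y==3):
--         otras_casillas=[(n,x1,y1) for y1 in range(2,4) for x1 in range(2) if x1!= x or y1!=y]
--     if (x==2 or x==3) and (y==0 or y==1):
--         otras_casillas=[(n,x1,y1) for y1 in range(2) for x1 in range(2,4) if x1!= x or y1!=y]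
--     if (x==2 or x==3) and (y==2 or y==3):
--         otras_casillas=[(n,x1,y1) for y1 in range(2,4) for x1 in range(2,4) if x1!= x or y1!=y]
--
--     return otras_casillas
-- ===== SOURCE B (Python) =====
-- def region(n, x, y):
--     # Only the 4x4 grid is populated; outside it there is no region.
--     if x not in range(4) or y not in range(4):
--         return []
--     # Scan the whole grid and keep the cells sharing (x, y)'s 2x2 block.
--     grid = [(x1, y1) for y1 in range(4) for x1 in range(4)]
--     return [(n, x1, y1) for (x1, y1) in grid
--             if x1 // 2 == x // 2 and y1 // 2 == y // 2 and (x1, y1) != (x, y)]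
-- ===== Notes on version B (the rewrite author's own statement) =====
-- stated objective: alternative
-- what changed: Instead of A's four quadrant branches each constructing its 2x2 block, B scans all 16 grid cells once and filters by a same-block predicate (x1//2 == x//2 and y1//2 == y//2), excluding (x,y) itself.
import Mathlib
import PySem

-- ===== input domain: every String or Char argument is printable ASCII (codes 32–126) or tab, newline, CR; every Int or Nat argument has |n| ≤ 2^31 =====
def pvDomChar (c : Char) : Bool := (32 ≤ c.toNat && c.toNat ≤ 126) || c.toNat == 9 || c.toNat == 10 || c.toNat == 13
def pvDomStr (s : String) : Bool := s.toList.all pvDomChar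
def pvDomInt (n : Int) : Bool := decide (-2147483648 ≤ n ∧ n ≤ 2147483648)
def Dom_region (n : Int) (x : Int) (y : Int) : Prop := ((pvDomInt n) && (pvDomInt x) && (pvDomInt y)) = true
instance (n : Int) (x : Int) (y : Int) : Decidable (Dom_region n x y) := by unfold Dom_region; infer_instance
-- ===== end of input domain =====

-- B scans the whole 4x4 grid once and keeps same-block cells by a floordiv predicate, instead of A's four quadrant branches; same behaviour, different traversal.
-- ===== PORT A =====
def region (n : Int) (x : Int) (y : Int) : List (Int × Int × Int) :=
  let otras : List (Int × Int × Int) := []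
  let otras := if (x = 0 ∨ x = 1) ∧ (y = 0 ∨ y = 1) then
      (PySem.List.pyRange 0 2 1).flatMap (fun y1 =>
        ((PySem.List.pyRange 0 2 1).filter (fun x1 => x1 != x || y1 != y)).map (fun x1 => (n, x1, y1)))
    else otras
  let otras := if (x = 0 ∨ x = 1) ∧ (y = 2 ∨ y = 3) then
      (PySem.List.pyRange 2 4 1).flatMap (fun y1 =>
        ((PySem.List.pyRange 0 2 1).filter (fun x1 => x1 != x || y1 != y)).map (fun x1 => (n, x1, y1)))
    else otras
  let otras := if (x = 2 ∨ x = 3) ∧ (y = 0 ∨ y = 1) then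
      (PySem.List.pyRange 0 2 1).flatMap (fun y1 =>
        ((PySem.List.pyRange 2 4 1).filter (fun x1 => x1 != x || y1 != y)).map (fun x1 => (n, x1, y1)))
    else otras
  let otras := if (x = 2 ∨ x = 3) ∧ (y = 2 ∨ y = 3) then
      (PySem.List.pyRange 2 4 1).flatMap (fun y1 =>
        ((PySem.List.pyRange 2 4 1).filter (fun x1 => x1 != x || y1 != y)).map (fun x1 => (n, x1, y1)))
    else otras
  otras

-- ===== PORT B =====
def region_alt (n : Int) (x : Int) (y : Int) : List (Int × Int × Int) :=
  if (0 ≤ x ∧ x < 4) ∧ (0 ≤ y ∧ y < 4) then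
    let grid : List (Int × Int) :=
      (PySem.List.pyRange 0 4 1).flatMap (fun y1 =>
        (PySem.List.pyRange 0 4 1).map (fun x1 => (x1, y1)))
    (grid.filter (fun p =>
        PySem.Int.floordiv p.1 2 == PySem.Int.floordiv x 2 &&
        PySem.Int.floordiv p.2 2 == PySem.Int.floordiv y 2 &&
        p != (x, y))).map (fun p => (n, p.1, p.2))
  else []

-- ===== PRECONDITION & SPEC =====
def Spec_region (n : Int) (x : Int) (y : Int) (out : List (Int × Int × Int)) : Prop := out = region_alt n x y
instance (n : Int) (x : Int) (y : Int) (out : List (Int × Int × Int)) : Decidable (Spec_region n x y out) := by unfold Spec_region; infer_instance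

-- ===== CLAIM =====
def Claim_equal_region : Prop := ∀ (n : Int) (x : Int) (y : Int), Dom_region n x y → Spec_region n x y (region n x y)

-- ===== LEMMAS AND PROOFS =====

-- ===== VERDICT =====
theorem region_spec : Claim_equal_region := by
  intro n x y _
  unfold Spec_region
  by_cases hx : x = 0 ∨ x = 1 ∨ x = 2 ∨ x = 3
  · by_cases hy : y = 0 ∨ y = 1 ∨ y = 2 ∨ y = 3
    · rcases hx with h|h|h|h <;> rcases hy with h'|h'|h'|h' <;> subst h <;> subst h' <;>
        norm_num [region, region_alt, PySem.List.pyRange, PySem.Int.floordiv, List.flatMap, Int.toNat, List.range_succ, Int.fdiv]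
    · have h1 : ¬ (y = 0 ∨ y = 1) := by tauto
      have h2 : ¬ (y = 2 ∨ y = 3) := by tauto
      have h3 : ¬ (0 ≤ y ∧ y < 4) := by omega
      simp [region, region_alt, h1, h2, h3]
  · have h1 : ¬ (x = 0 ∨ x = 1) := by tauto
    have h2 : ¬ (x = 2 ∨ x = 3) := by tauto
    have h3 : ¬ (0 ≤ x ∧ x < 4) := by omega
    simp [region, region_alt, h1, h2, h3]
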